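-- pv_equiv track=rewrite | github.com/sujeong11/Algorithm-Solving | 완전탐색/05_피로도.py | solution
-- ===== SOURCE A (Python) =====
-- from itertools import permutations
--
-- def solution(k, dungeons):
--     answer = -1
--     dungeons = list(permutations(dungeons, len(dungeons)))
--
--     for dungeon in dungeons:
--         _k = k
--         count = 0
--
--         for d in dungeon:
--             if (d[0] <= _k):
--                 _k -= d[1]
--                 count += 1
--
--         answer = max(count, answer)
--
--     return answer
-- ===== SOURCE B (Python) =====
-- def solution(k, dungeons):
--     def dfs(k, ds):
--         best = 0
--         for i in range(len(ds)):
--             if ds[i][0] <= k: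
--                 best = max(best, 1 + dfs(k - ds[i][1], ds[:i] + ds[i+1:]))
--         return best
--     return dfs(k, dungeons)
-- ===== Notes on version B (the rewrite author's own statement) =====
-- stated objective: alternative
-- what changed: A materializes the full list of n! permutations and runs a skip-allowed greedy count over each; B is a recursive depth-first backtracking search that only branches on dungeons currently affordable, never materializing permutations.
-- outside the precondition, e.g. on solution(0, [[1], [5, -10]]): A returns 0, B returns 0
import Mathlib
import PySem

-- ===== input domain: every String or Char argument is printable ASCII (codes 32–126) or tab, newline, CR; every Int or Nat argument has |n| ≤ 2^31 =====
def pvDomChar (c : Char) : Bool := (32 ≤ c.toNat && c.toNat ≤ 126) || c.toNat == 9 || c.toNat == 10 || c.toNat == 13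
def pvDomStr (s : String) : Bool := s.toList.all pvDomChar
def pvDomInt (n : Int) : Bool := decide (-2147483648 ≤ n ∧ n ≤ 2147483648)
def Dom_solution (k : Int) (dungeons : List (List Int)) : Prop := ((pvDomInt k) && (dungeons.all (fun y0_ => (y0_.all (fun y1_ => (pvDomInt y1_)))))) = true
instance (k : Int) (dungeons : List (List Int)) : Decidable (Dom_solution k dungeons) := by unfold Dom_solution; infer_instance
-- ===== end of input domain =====

-- B replaces A's exhaustive permutation enumeration (max of a skip-allowed greedy count over each
-- of the n! materialized permutations) by a recursive depth-first backtracking search that only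
-- branches on currently affordable dungeons; same return value on Pre_ (objective: alternative).

-- ===== PORT A =====
-- d[i] on a dungeon entry (total guard; Pre_ guarantees Python does not raise)
def dget (d : List Int) (i : Int) : Int := (PySem.List.pyGet? d i).getD 0

-- A's inner loop: one greedy pass over a permutation, state (_k, count)
def stepA (s : Int × Int) (d : List Int) : Int × Int :=
  if dget d 0 ≤ s.1 then (s.1 - dget d 1, s.2 + 1) else s

def runA (k : Int) (dungeon : List (List Int)) : Int × Int := dungeon.foldl stepA (k, 0)

def solution (k : Int) (dungeons : List (List Int)) : Int :=
  (PySem.List.permutations dungeons dungeons.length).foldl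
    (fun answer dungeon => max (runA k dungeon).2 answer) (-1)

-- ===== PORT B =====
-- ds[i] for a nonnegative loop index (total guard)
def dnth (ds : List (List Int)) (i : Nat) : List Int := (PySem.List.pyGet? ds (i : Int)).getD []

-- Source B's dfs; fuel = length of the list (each recursive call erases one element)
def dfsB : Nat → Int → List (List Int) → Int
  | 0, _, _ => 0
  | n+1, k, ds =>
    (List.range ds.length).foldl
      (fun best i =>
        if dget (dnth ds i) 0 ≤ k then
          max best (1 + dfsB n (k - dget (dnth ds i) 1) (ds.eraseIdx i))
        else best) 0

def solution_alt (k : Int) (dungeons : List (List Int)) : Int :=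
  dfsB dungeons.length k dungeons

-- ===== PRECONDITION & SPEC =====
-- Pre_ excludes dungeon entries with fewer than two elements — there Python A can raise
-- IndexError (always for an empty entry; for a one-element entry whenever its requirement becomes
-- affordable) — except one-element entries whose requirement provably exceeds every reachable
-- fatigue (k plus the total possible fatigue gain from negative costs), which are never indexed at 1.
def Pre_solution (k : Int) (dungeons : List (List Int)) : Prop :=
  ∀ d ∈ dungeons, 2 ≤ d.length ∨
    (d.length = 1 ∧
      k + ((dungeons.filter (fun e => 2 ≤ e.length)).map (fun e => max 0 (-(dget e 1)))).sum
        < dget d 0)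
instance (k : Int) (dungeons : List (List Int)) : Decidable (Pre_solution k dungeons) := by
  unfold Pre_solution; infer_instance

def pvWitness_solution : Int × List (List Int) := (80, [[80, 20], [50, 40], [30, 10]])

def Spec_solution (k : Int) (dungeons : List (List Int)) (out : Int) : Prop := out = solution_alt k dungeons
instance (k : Int) (dungeons : List (List Int)) (out : Int) : Decidable (Spec_solution k dungeons out) := by unfold Spec_solution; infer_instance

-- ===== CLAIM (what is proved, stated in full; the proofs are below) =====
def Claim_equal_solution : Prop := ∀ (k : Int) (dungeons : List (List Int)), Dom_solution k dungeons → Pre_solution k dungeons → Spec_solution k dungeons (solution k dungeons)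

-- ===== LEMMAS AND PROOFS =====

-- unfolding of permutations at a successor count
theorem perm_succ {α : Type} (xs : List α) (r : Nat) :
    PySem.List.permutations xs (r+1) =
      (List.range xs.length).flatMap (fun i =>
        match xs[i]? with
        | none => []
        | some x => (PySem.List.permutations (xs.eraseIdx i) r).map (fun p => x :: p)) := by
  rw [PySem.List.permutations]
  rfl

-- B-side one-step unfolding: solution_alt as a fold of stepB over the index range
def stepB (k : Int) (ds : List (List Int)) (best : Int) (i : Nat) : Int :=
  if dget (dnth ds i) 0 ≤ k then
    max best (1 + solution_alt (k - dget (dnth ds i) 1) (ds.eraseIdx i))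
  else best

theorem alt_unfold (k : Int) (ds : List (List Int)) :
    solution_alt k ds = (List.range ds.length).foldl (stepB k ds) 0 := by
  unfold solution_alt
  cases h : ds.length with
  | zero =>
    have : ds = [] := List.length_eq_zero_iff.mp h
    subst this; rfl
  | succ n =>
    simp only [dfsB]
    rw [h]
    apply PySem.List.foldl_congr_mem
    intro acc i hi
    have hi' : i < ds.length := by
      have := List.mem_range.mp hi; omega
    have hlen : (ds.eraseIdx i).length = n := by
      rw [List.length_eraseIdx]; simp only [hi', if_true]; omega
    unfold stepB solution_alt
    rw [hlen]

theorem stepB_ge_init (k : Int) (ds : List (List Int)) (l : List Nat) :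
    ∀ init : Int, init ≤ l.foldl (stepB k ds) init := by
  induction l with
  | nil => intro init; exact le_refl _
  | cons x xs ih =>
    intro init
    simp only [List.foldl_cons]
    refine le_trans ?_ (ih (stepB k ds init x))
    unfold stepB; split_ifs
    · exact le_max_left _ _
    · exact le_refl _

theorem stepB_ge (k : Int) (ds : List (List Int)) (l : List Nat) (i : Nat) :
    ∀ init : Int, i ∈ l → dget (dnth ds i) 0 ≤ k →
      1 + solution_alt (k - dget (dnth ds i) 1) (ds.eraseIdx i) ≤ l.foldl (stepB k ds) init := by
  induction l with
  | nil => intro init hi _; cases hi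
  | cons x xs ih =>
    intro init hi hc
    simp only [List.foldl_cons]
    rcases List.mem_cons.mp hi with rfl | hmem
    · refine le_trans ?_ (stepB_ge_init k ds xs (stepB k ds init i))
      unfold stepB; rw [if_pos hc]; exact le_max_right _ _
    · exact ih _ hmem hc

theorem stepB_cases (k : Int) (ds : List (List Int)) (l : List Nat) :
    ∀ init : Int, l.foldl (stepB k ds) init = init ∨
      ∃ i ∈ l, dget (dnth ds i) 0 ≤ k ∧
        l.foldl (stepB k ds) init = 1 + solution_alt (k - dget (dnth ds i) 1) (ds.eraseIdx i) := by
  induction l with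
  | nil => intro init; exact Or.inl rfl
  | cons x xs ih =>
    intro init
    simp only [List.foldl_cons]
    by_cases hc : dget (dnth ds x) 0 ≤ k
    · have hx : stepB k ds init x
          = max init (1 + solution_alt (k - dget (dnth ds x) 1) (ds.eraseIdx x)) := by
        unfold stepB; rw [if_pos hc]
      rcases ih (stepB k ds init x) with h0 | ⟨i, hi, hci, heq⟩
      · rcases le_total init (1 + solution_alt (k - dget (dnth ds x) 1) (ds.eraseIdx x)) with h | h
        · exact Or.inr ⟨x, List.mem_cons_self .., hc, by rw [h0, hx, max_eq_right h]⟩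
        · exact Or.inl (by rw [h0, hx, max_eq_left h])
      · exact Or.inr ⟨i, List.mem_cons_of_mem _ hi, hci, heq⟩
    · have hx : stepB k ds init x = init := by unfold stepB; rw [if_neg hc]
      rw [hx]
      rcases ih init with h0 | ⟨i, hi, hci, heq⟩
      · exact Or.inl h0
      · exact Or.inr ⟨i, List.mem_cons_of_mem _ hi, hci, heq⟩

theorem alt_nonneg (k : Int) (ds : List (List Int)) : 0 ≤ solution_alt k ds := by
  rw [alt_unfold]; exact stepB_ge_init k ds _ 0

-- A's greedy count: accumulator shift and cons unfolding
theorem runA_shift (p : List (List Int)) : ∀ (k c : Int),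
    (p.foldl stepA (k, c)).2 = c + (p.foldl stepA (k, 0)).2 := by
  induction p with
  | nil => intro k c; simp
  | cons d q ih =>
    intro k c
    simp only [List.foldl_cons]
    by_cases hc : dget d 0 ≤ k
    · rw [show stepA (k, c) d = (k - dget d 1, c + 1) by simp [stepA, hc],
          show stepA (k, 0) d = (k - dget d 1, 0 + 1) by simp [stepA, hc]]
      rw [ih (k - dget d 1) (c + 1), ih (k - dget d 1) (0 + 1)]
      ring
    · rw [show stepA (k, c) d = (k, c) by simp [stepA, hc],
          show stepA (k, 0) d = (k, 0) by simp [stepA, hc]]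
      exact ih k c

theorem runA_snd_cons (k : Int) (d : List Int) (q : List (List Int)) :
    (runA k (d :: q)).2
      = if dget d 0 ≤ k then 1 + (runA (k - dget d 1) q).2 else (runA k q).2 := by
  simp only [runA, List.foldl_cons]
  by_cases hc : dget d 0 ≤ k
  · rw [show stepA (k, 0) d = (k - dget d 1, 1) by simp [stepA, hc], if_pos hc]
    have := runA_shift q (k - dget d 1) 1
    omega
  · rw [show stepA (k, 0) d = (k, 0) by simp [stepA, hc], if_neg hc]

theorem runA_snd_nonneg (k : Int) (p : List (List Int)) : 0 ≤ (runA k p).2 := by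
  induction p generalizing k with
  | nil => exact le_refl _
  | cons d q ih =>
    rw [runA_snd_cons]; split_ifs
    · have := ih (k - dget d 1); omega
    · exact ih k

-- picking an element of a list by its first index: getElem? and eraseIdx agree with erase
theorem erase_spec (a : List Int) (l : List (List Int)) (h : a ∈ l) :
    ∃ i, i < l.length ∧ l[i]? = some a ∧ l.eraseIdx i = l.erase a := by
  induction l with
  | nil => cases h
  | cons b t ih =>
    by_cases hb : b = a
    · subst hb
      exact ⟨0, by simp, by simp, by simp⟩
    · have ht : a ∈ t := by
        rcases List.mem_cons.mp h with h' | h'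
        · exact absurd h'.symm hb
        · exact h'
      obtain ⟨i, hi, hget, herase⟩ := ih ht
      refine ⟨i + 1, by simpa using hi, by simpa using hget, ?_⟩
      rw [List.eraseIdx_cons_succ, herase, List.erase_cons_tail (by simpa using hb)]

-- the picked element heads a permutation of the list
theorem perm_cons_eraseIdx (ds : List (List Int)) (i : Nat) (hi : i < ds.length) :
    ds.Perm (dnth ds i :: ds.eraseIdx i) := by
  induction ds generalizing i with
  | nil => cases hi
  | cons d t ih =>
    cases i with
    | zero =>
      have hd : dnth (d :: t) 0 = d := by
        unfold dnth; rw [PySem.List.pyGet?_natCast]; rfl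
      rw [hd, List.eraseIdx_cons_zero]
    | succ j =>
      have hj : j < t.length := by simpa using hi
      have hd : dnth (d :: t) (j + 1) = dnth t j := by
        unfold dnth
        rw [PySem.List.pyGet?_natCast, PySem.List.pyGet?_natCast]
        simp
      rw [hd, List.eraseIdx_cons_succ]
      exact ((ih j hj).cons d).trans (List.Perm.swap _ _ _)

-- UPPER BOUND: any greedy count along a sub-permutation is at most the DFS value
theorem greedy_le_alt (p : List (List Int)) :
    ∀ (k : Int) (ds : List (List Int)), p.Subperm ds → (runA k p).2 ≤ solution_alt k ds := by
  induction p with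
  | nil => intro k ds _; exact alt_nonneg k ds
  | cons d q ih =>
    intro k ds h
    have hd : d ∈ ds := h.subset (List.mem_cons_self ..)
    rw [runA_snd_cons]
    split_ifs with hc
    · obtain ⟨i, hi, hget, herase⟩ := erase_spec d ds hd
      have hq : q.Subperm (ds.erase d) := by
        have h2 : (d :: q).Subperm (d :: ds.erase d) :=
          h.trans (List.perm_cons_erase hd).subperm
        exact (List.subperm_cons d).mp h2
      have hdn : dnth ds i = d := by
        unfold dnth; rw [PySem.List.pyGet?_natCast, hget]; rfl
      have hih := ih (k - dget d 1) (ds.eraseIdx i) (herase ▸ hq)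
      rw [alt_unfold]
      have hb := stepB_ge k ds (List.range ds.length) i 0 (List.mem_range.mpr hi)
        (by rw [hdn]; exact hc)
      rw [hdn] at hb
      omega
    · have hq : q.Subperm ds := (List.sublist_cons_self d q).subperm.trans h
      exact ih k ds hq

-- LOWER BOUND: the DFS value is realized by the greedy count of some permutation
theorem alt_le_greedy (n : Nat) :
    ∀ (ds : List (List Int)) (k : Int), ds.length ≤ n →
      ∃ p, p.Perm ds ∧ solution_alt k ds ≤ (runA k p).2 := by
  induction n with
  | zero =>
    intro ds k hlen
    have : ds = [] := List.length_eq_zero_iff.mp (Nat.le_zero.mp hlen)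
    subst this
    exact ⟨[], List.Perm.refl _, le_refl _⟩
  | succ n ih =>
    intro ds k hlen
    rcases stepB_cases k ds (List.range ds.length) 0 with h0 | ⟨i, hi, hc, heq⟩
    · exact ⟨ds, List.Perm.refl ds, by rw [alt_unfold, h0]; exact runA_snd_nonneg k ds⟩
    · have hi' : i < ds.length := List.mem_range.mp hi
      have hlen2 : (ds.eraseIdx i).length ≤ n := by
        rw [List.length_eraseIdx]; simp only [hi', if_true]; omega
      obtain ⟨q, hq, hle⟩ := ih (ds.eraseIdx i) (k - dget (dnth ds i) 1) hlen2
      refine ⟨dnth ds i :: q, ?_, ?_⟩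
      · exact (hq.cons _).trans (perm_cons_eraseIdx ds i hi').symm
      · rw [alt_unfold, heq, runA_snd_cons, if_pos hc]
        omega

-- COMPLETENESS of the permutation enumeration
theorem mem_perms (n : Nat) :
    ∀ (ds p : List (List Int)), ds.length ≤ n → p.Perm ds →
      p ∈ PySem.List.permutations ds ds.length := by
  induction n with
  | zero =>
    intro ds p hlen hp
    have hds : ds = [] := List.length_eq_zero_iff.mp (Nat.le_zero.mp hlen)
    subst hds
    have : p = [] := List.Perm.eq_nil hp
    subst this
    rw [List.length_nil, PySem.List.permutations_zero]
    exact List.mem_singleton.mpr rfl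
  | succ n ih =>
    intro ds p hlen hp
    cases hds : ds with
    | nil =>
      subst hds
      have : p = [] := List.Perm.eq_nil hp
      subst this
      rw [List.length_nil, PySem.List.permutations_zero]
      exact List.mem_singleton.mpr rfl
    | cons d0 t =>
      subst hds
      cases p with
      | nil => exact absurd hp.symm.eq_nil (by simp)
      | cons d q =>
        have hd : d ∈ d0 :: t := hp.subset (List.mem_cons_self ..)
        obtain ⟨i, hi, hget, herase⟩ := erase_spec d (d0 :: t) hd
        have hq : q.Perm ((d0 :: t).eraseIdx i) := by
          rw [herase]
          exact (hp.trans (List.perm_cons_erase hd)).cons_inv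
        have hlen2 : ((d0 :: t).eraseIdx i).length ≤ n := by
          rw [List.length_eraseIdx]
          simp only [hi, if_true]
          simpa using Nat.le_of_succ_le_succ (by simpa using hlen)
        have hmemq := ih ((d0 :: t).eraseIdx i) q hlen2 hq
        have hL : (d0 :: t).length = ((d0 :: t).eraseIdx i).length + 1 := by
          rw [List.length_eraseIdx]; simp only [hi, if_true]
          have : 0 < (d0 :: t).length := by simp
          omega
        rw [hL, perm_succ]
        refine List.mem_flatMap.mpr ⟨i, List.mem_range.mpr hi, ?_⟩
        rw [hget]
        exact List.mem_map.mpr ⟨q, hmemq, rfl⟩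

-- A-shaped outer fold: bounds
theorem amax_ge_init (k : Int) (l : List (List (List Int))) :
    ∀ init : Int, init ≤ l.foldl (fun answer dungeon => max (runA k dungeon).2 answer) init := by
  induction l with
  | nil => intro init; exact le_refl _
  | cons p ps ih =>
    intro init
    simp only [List.foldl_cons]
    exact le_trans (le_max_right _ _) (ih _)

theorem amax_ge (k : Int) (l : List (List (List Int))) (p : List (List Int)) :
    ∀ init : Int, p ∈ l →
      (runA k p).2 ≤ l.foldl (fun answer dungeon => max (runA k dungeon).2 answer) init := by
  induction l with
  | nil => intro init hp; cases hp
  | cons x xs ih =>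
    intro init hp
    simp only [List.foldl_cons]
    rcases List.mem_cons.mp hp with rfl | hmem
    · exact le_trans (le_max_left _ _) (amax_ge_init k xs _)
    · exact ih _ hmem

theorem amax_le (k : Int) (l : List (List (List Int))) (B : Int) :
    ∀ init : Int, init ≤ B → (∀ p ∈ l, (runA k p).2 ≤ B) →
      l.foldl (fun answer dungeon => max (runA k dungeon).2 answer) init ≤ B := by
  induction l with
  | nil => intro init h0 _; exact h0
  | cons x xs ih =>
    intro init h0 h
    simp only [List.foldl_cons]
    exact ih _ (max_le (h x (List.mem_cons_self ..)) h0)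
      (fun p hp => h p (List.mem_cons_of_mem _ hp))

-- ===== VERDICT (by name: the statement is the Claim_ definition above) =====
theorem solution_spec : Claim_equal_solution := by
  intro k ds _ _
  unfold Spec_solution
  apply le_antisymm
  · unfold solution
    apply amax_le
    · exact le_trans (by norm_num) (alt_nonneg k ds)
    · intro p hp
      exact greedy_le_alt p k ds (PySem.List.perm_of_mem_permutations hp).subperm
  · obtain ⟨p, hperm, hle⟩ := alt_le_greedy ds.length ds k (le_refl _)
    have hmem := mem_perms ds.length ds p (le_refl _) hperm
    exact le_trans hle (amax_ge k _ p (-1) hmem)
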